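-- pv_equiv track=rewrite | github.com/JoeFlow01/CompilersPhase1G29 | main.py | expressionchecker
-- ===== SOURCE A (Python) =====
-- numbers = "0123456789"
--
-- operators = "+-*/"
--
-- letters = "abcdefghijklmnopqrstuvwxyzABCDEFGHIJKLMNOPQRSTUVWXYZ"
--
-- def evenchecker(number):
--     if number%2 ==0:
--         return True
--     else:
--         return False
--
-- def IdentifierChecker(word):
--     if word[0] not in letters:
--         return False
--     for i in word:
--         if((i not in letters) and (i not in numbers)):
--             return False
--     return True
--
-- def operatorchecker(word):
--     if len(word) > 1:
--         return False
--     if word[0] not in operators: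
--         return False
--     return True
--
-- def numchecker(word):
--     if (word.count(".") > 1):
--         return False
--     if((word[0]==".") or (word[len(word)-1]==".")):
--         return False
--     for i in word:
--         if((i not in numbers) and i!="."):
--             return False
--     return True
--
-- def expressionchecker(sentence):
--     splited_sentence=sentence.split()
--     if  evenchecker(len(splited_sentence)):
--         return "Not accepted"
--     for i in range(0, len(splited_sentence), 2):
--         if((numchecker(splited_sentence[i])!=True) and(IdentifierChecker(splited_sentence[i])!=True)):
--             return "Not accepted"
--     for i in range(1, len(splited_sentence), 2):
--         if(operatorchecker(splited_sentence[i])!=True):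
--             return "Not accepted"
--     return "Accepted"
-- ===== SOURCE B (Python) =====
-- numbers = "0123456789"
--
-- operators = "+-*/"
--
-- letters = "abcdefghijklmnopqrstuvwxyzABCDEFGHIJKLMNOPQRSTUVWXYZ"
--
-- def IdentifierChecker(word):
--     if word[0] not in letters:
--         return False
--     for i in word:
--         if((i not in letters) and (i not in numbers)):
--             return False
--     return True
--
-- def operatorchecker(word):
--     if len(word) > 1:
--         return False
--     if word[0] not in operators:
--         return False
--     return True
--
-- def numchecker(word):
--     if (word.count(".") > 1):
--         return False
--     if((word[0]==".") or (word[len(word)-1]==".")):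
--         return False
--     for i in word:
--         if((i not in numbers) and i!="."):
--             return False
--     return True
--
-- def _operand(tok):
--     return numchecker(tok) or IdentifierChecker(tok)
--
-- def expressionchecker(sentence):
--     # grammar-driven parser: expr := operand (operator operand)*
--     tokens = sentence.split()
--     if not tokens or not _operand(tokens[0]):
--         return "Not accepted"
--     rest = tokens[1:]
--     while rest:
--         if len(rest) < 2:
--             return "Not accepted"
--         if not (operatorchecker(rest[0]) and _operand(rest[1])):
--             return "Not accepted"
--         rest = rest[2:]
--     return "Accepted"
-- ===== Notes on version B (the rewrite author's own statement) =====
-- stated objective: alternative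
-- what changed: Replaced A's even-length guard plus two separate strided index passes (operands at even indices, operators at odd indices) with a grammar-driven parser that consumes the token list from the front: one leading operand, then repeated (operator, operand) pairs; the length-parity rejection falls out of the grammar instead of being checked explicitly.
import Mathlib
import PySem

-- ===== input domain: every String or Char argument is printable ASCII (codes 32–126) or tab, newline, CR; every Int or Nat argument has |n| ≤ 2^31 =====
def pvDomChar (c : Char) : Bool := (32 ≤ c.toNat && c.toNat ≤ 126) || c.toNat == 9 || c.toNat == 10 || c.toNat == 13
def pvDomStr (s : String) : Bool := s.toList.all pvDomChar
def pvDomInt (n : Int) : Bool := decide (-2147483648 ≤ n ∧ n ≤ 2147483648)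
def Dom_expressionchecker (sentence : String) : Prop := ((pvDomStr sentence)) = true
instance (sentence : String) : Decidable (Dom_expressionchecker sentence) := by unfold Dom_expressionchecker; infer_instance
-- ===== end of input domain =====

-- B replaces A's even-length guard and two strided index passes with a grammar-driven
-- parser consuming 'operand (operator operand)*' from the front; objective: alternative.

-- ===== PORT A =====
-- module constants (shared by both ports, as in the Python module)
def pvNumbers : List Char := "0123456789".toList
def pvOperators : List Char := "+-*/".toList
def pvLetters : List Char := "abcdefghijklmnopqrstuvwxyzABCDEFGHIJKLMNOPQRSTUVWXYZ".toList

def evenchecker (number : Int) : Bool :=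
  if PySem.Int.mod number 2 == 0 then true else false

-- word[0] with none = IndexError; unreachable here: split() tokens are nonempty
def IdentifierChecker (word : String) : Bool :=
  match PySem.List.pyGet? word.toList 0 with
  | none => false
  | some c =>
    if !(pvLetters.contains c) then false
    else word.toList.all (fun i => pvLetters.contains i || pvNumbers.contains i)

def operatorchecker (word : String) : Bool :=
  if word.toList.length > 1 then false
  else match PySem.List.pyGet? word.toList 0 with
  | none => false
  | some c => if !(pvOperators.contains c) then false else true

def numchecker (word : String) : Bool :=
  if PySem.Str.count word "." > 1 then false
  else match PySem.List.pyGet? word.toList 0,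
             PySem.List.pyGet? word.toList ((word.toList.length : Int) - 1) with
  | some c0, some cl =>
    if c0 == '.' || cl == '.' then false
    else word.toList.all (fun i => pvNumbers.contains i || i == '.')
  | _, _ => false

-- for i in range(0, len, 2): first operand failure returns "Not accepted"
def pvALoop1 (ts : List String) : List Int → Option String
  | [] => none
  | i :: rest =>
    if (numchecker (PySem.List.pyGetD ts i "") != true)
        && (IdentifierChecker (PySem.List.pyGetD ts i "") != true)
    then some "Not accepted" else pvALoop1 ts rest

-- for i in range(1, len, 2): first operator failure returns "Not accepted"
def pvALoop2 (ts : List String) : List Int → Option String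
  | [] => none
  | i :: rest =>
    if operatorchecker (PySem.List.pyGetD ts i "") != true
    then some "Not accepted" else pvALoop2 ts rest

def expressionchecker (sentence : String) : String :=
  let ts := PySem.Str.split₀ sentence
  if evenchecker (ts.length : Int) then "Not accepted"
  else
    match pvALoop1 ts (PySem.List.pyRange 0 (ts.length : Int) 2) with
    | some r => r
    | none =>
      match pvALoop2 ts (PySem.List.pyRange 1 (ts.length : Int) 2) with
      | some r => r
      | none => "Accepted"

-- ===== PORT B =====
def pvOperand (tok : String) : Bool := numchecker tok || IdentifierChecker tok

-- the 'while rest:' loop: consume (operator, operand) pairs from the front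
-- (len(rest) < 2 with rest nonempty is the singleton case; rest[2:] is the tail)
def pvBLoop : List String → String
  | [] => "Accepted"
  | [_] => "Not accepted"
  | op :: x :: rest =>
    if !(operatorchecker op && pvOperand x) then "Not accepted" else pvBLoop rest

def expressionchecker_alt (sentence : String) : String :=
  match PySem.Str.split₀ sentence with
  | [] => "Not accepted"
  | t :: rest => if !(pvOperand t) then "Not accepted" else pvBLoop rest

-- ===== PRECONDITION & SPEC =====
def Spec_expressionchecker (sentence : String) (out : String) : Prop := out = expressionchecker_alt sentence
instance (sentence : String) (out : String) : Decidable (Spec_expressionchecker sentence out) := by unfold Spec_expressionchecker; infer_instance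

-- ===== CLAIM (what is proved, stated in full; the proofs are below) =====
def Claim_equal_expressionchecker : Prop := ∀ (sentence : String), Dom_expressionchecker sentence → Spec_expressionchecker sentence (expressionchecker sentence)

-- ===== LEMMAS AND PROOFS =====

lemma pvMod_two_int (i : Int) : PySem.Int.mod i 2 = i % 2 := by
  simp [PySem.Int.mod, Int.fmod_eq_emod]

lemma pvBne_and (a b : Bool) : ((a != true) && (b != true)) = !(a || b) := by
  cases a <;> cases b <;> rfl

lemma pvBne (a : Bool) : (a != true) = !a := by cases a <;> rfl

lemma pvNested (c1 c2 : Prop) [Decidable c1] [Decidable c2] :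
    (match (if c1 then (none : Option String) else some "Not accepted") with
     | some r => r
     | none =>
       match (if c2 then (none : Option String) else some "Not accepted") with
       | some r => r
       | none => "Accepted") = if c1 ∧ c2 then "Accepted" else "Not accepted" := by
  by_cases h1 : c1 <;> by_cases h2 : c2 <;> simp [h1, h2]

lemma pvALoop1_eq (ts : List String) (idxs : List Int) :
    pvALoop1 ts idxs =
      if idxs.all (fun i => pvOperand (PySem.List.pyGetD ts i "")) then none
      else some "Not accepted" := by
  induction idxs with
  | nil => simp [pvALoop1]
  | cons i rest ih =>
    simp only [pvALoop1, List.all_cons, ih, pvOperand, pvBne_and]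
    by_cases h : (numchecker (PySem.List.pyGetD ts i "")
        || IdentifierChecker (PySem.List.pyGetD ts i "")) = true
    · simp [h]
    · simp only [Bool.not_eq_true] at h; simp [h]

lemma pvALoop2_eq (ts : List String) (idxs : List Int) :
    pvALoop2 ts idxs =
      if idxs.all (fun i => operatorchecker (PySem.List.pyGetD ts i "")) then none
      else some "Not accepted" := by
  induction idxs with
  | nil => simp [pvALoop2]
  | cons i rest ih =>
    simp only [pvALoop2, List.all_cons, ih, pvBne]
    by_cases h : operatorchecker (PySem.List.pyGetD ts i "") = true
    · simp [h]
    · simp only [Bool.not_eq_true] at h; simp [h]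

-- B's loop accepts exactly the even-length alternating (operator, operand) lists
lemma pvBLoop_eq (l : List String) :
    pvBLoop l =
      if (l.length % 2 = 0 ∧ ∀ k, (hk : k < l.length) →
            (if k % 2 = 0 then operatorchecker l[k] else pvOperand l[k]) = true)
      then "Accepted" else "Not accepted" := by
  induction l using pvBLoop.induct with
  | case1 => simp [pvBLoop]
  | case2 x => simp [pvBLoop]
  | case3 op x rest hok =>
    rw [Bool.not_eq_true'] at hok
    simp only [pvBLoop, hok, Bool.not_false, if_true]
    rw [Bool.and_eq_false_iff] at hok
    rw [if_neg]
    rintro ⟨-, hall⟩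
    rcases hok with h | h
    · have := hall 0 (by simp)
      simp [h] at this
    · have := hall 1 (by simp)
      simp [h] at this
  | case4 op x rest hok ih =>
    replace hok : (operatorchecker op && pvOperand x) = true := by
      revert hok; cases (operatorchecker op && pvOperand x) <;> simp
    simp only [pvBLoop, hok, Bool.not_true, Bool.false_eq_true, if_false, ih]
    rw [Bool.and_eq_true] at hok
    congr 1
    rw [eq_iff_iff]
    constructor
    · rintro ⟨hlen, hall⟩
      refine ⟨by simp only [List.length_cons] at hlen ⊢; omega, ?_⟩
      intro k hk
      match k with
      | 0 => simpa using hok.1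
      | 1 => simpa using hok.2
      | (m+2) =>
        have := hall m (by simpa using hk)
        simpa [Nat.add_mod_right] using this
    · rintro ⟨hlen, hall⟩
      refine ⟨by simp only [List.length_cons] at hlen ⊢; omega, ?_⟩
      intro m hm
      have := hall (m+2) (by simpa using hm)
      simpa [Nat.add_mod_right] using this

-- A's two range-passes say exactly: every position passes its parity check
lemma pvRanges_iff (ts : List String) :
    ((PySem.List.pyRange 0 (ts.length : Int) 2).all
        (fun i => pvOperand (PySem.List.pyGetD ts i "")) = true
      ∧ (PySem.List.pyRange 1 (ts.length : Int) 2).all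
        (fun i => operatorchecker (PySem.List.pyGetD ts i "")) = true)
    ↔ (∀ k, (hk : k < ts.length) →
        (if k % 2 = 0 then pvOperand ts[k] else operatorchecker ts[k]) = true) := by
  simp only [List.all_eq_true,
    PySem.List.mem_pyRange_iff_of_pos (by norm_num : (0:Int) < 2)]
  constructor
  · rintro ⟨he, ho⟩ k hk
    rcases Nat.even_or_odd k with ⟨m, hm⟩ | ⟨m, hm⟩
    · have := he (k : Int) ⟨by omega, by omega, by omega⟩
      rw [PySem.List.pyGetD_eq_getElem ts "" (by omega) (by omega)] at this
      simp only [Int.toNat_natCast] at this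
      rw [if_pos (by omega)]; exact this
    · have := ho (k : Int) ⟨by omega, by omega, by omega⟩
      rw [PySem.List.pyGetD_eq_getElem ts "" (by omega) (by omega)] at this
      simp only [Int.toNat_natCast] at this
      rw [if_neg (by omega)]; exact this
  · intro h
    refine ⟨fun i hi => ?_, fun i hi => ?_⟩
    · obtain ⟨h0, hlt, hdvd⟩ := hi
      have hx := h i.toNat (by omega)
      rw [if_pos (by omega)] at hx
      rw [PySem.List.pyGetD_eq_getElem ts "" h0 (by omega)]
      exact hx
    · obtain ⟨h0, hlt, hdvd⟩ := hi
      have hx := h i.toNat (by omega)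
      rw [if_neg (by omega)] at hx
      rw [PySem.List.pyGetD_eq_getElem ts "" (by omega) (by omega)]
      exact hx

-- shifting the parity condition across the leading operand
lemma pvShift (t : String) (rest : List String) :
    (∀ k, (hk : k < (t :: rest).length) →
        (if k % 2 = 0 then pvOperand (t :: rest)[k] else operatorchecker (t :: rest)[k]) = true)
    ↔ (pvOperand t = true ∧ ∀ k, (hk : k < rest.length) →
        (if k % 2 = 0 then operatorchecker rest[k] else pvOperand rest[k]) = true) := by
  constructor
  · intro h
    refine ⟨by simpa using h 0 (by simp), ?_⟩
    intro k hk
    have := h (k+1) (by simpa using hk)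
    rcases Nat.even_or_odd k with ⟨m, hm⟩ | ⟨m, hm⟩
    · rw [if_neg (by omega)] at this
      rw [if_pos (by omega)]
      simpa using this
    · rw [if_pos (by omega)] at this
      rw [if_neg (by omega)]
      simpa using this
  · rintro ⟨h0, h⟩ k hk
    match k with
    | 0 => simpa using h0
    | (m+1) =>
      have := h m (by simpa using hk)
      rcases Nat.even_or_odd m with ⟨j, hj⟩ | ⟨j, hj⟩
      · rw [if_pos (by omega)] at this
        rw [if_neg (by omega)]
        simpa using this
      · rw [if_neg (by omega)] at this
        rw [if_pos (by omega)]
        simpa using this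

-- ===== VERDICT (by name: the statement is the Claim_ definition above) =====
theorem expressionchecker_spec : Claim_equal_expressionchecker := by
  intro sentence _
  unfold Spec_expressionchecker expressionchecker expressionchecker_alt
  cases hts : PySem.Str.split₀ sentence with
  | nil => simp [evenchecker]
  | cons t rest =>
    simp only [pvALoop1_eq, pvALoop2_eq]
    by_cases hev : evenchecker (((t :: rest) : List String).length : Int) = true
    · -- length even: A rejects outright; B's grammar cannot accept an even-length list
      simp only [hev, if_true]
      rw [pvBLoop_eq]
      have hlen : ¬ (rest.length % 2 = 0) := by
        simp only [evenchecker, pvMod_two_int, beq_iff_eq] at hev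
        split at hev
        · rename_i h; simp only [List.length_cons] at h; omega
        · exact absurd hev (by simp)
      by_cases hop : pvOperand t = true
      · simp only [hop, Bool.not_true, Bool.false_eq_true, if_false]
        rw [if_neg (by rintro ⟨h, -⟩; exact hlen h)]
      · rw [Bool.not_eq_true] at hop
        simp [hop]
    · simp only [hev, Bool.false_eq_true, if_false]
      have hlen : rest.length % 2 = 0 := by
        simp only [evenchecker, pvMod_two_int, beq_iff_eq] at hev
        split at hev
        · exact absurd rfl hev
        · rename_i h; simp only [List.length_cons] at h; omega
      rw [pvNested, pvBLoop_eq]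
      by_cases hc : ((PySem.List.pyRange 0 (((t :: rest) : List String).length : Int) 2).all
            (fun i => pvOperand (PySem.List.pyGetD (t :: rest) i "")) = true
          ∧ (PySem.List.pyRange 1 (((t :: rest) : List String).length : Int) 2).all
            (fun i => operatorchecker (PySem.List.pyGetD (t :: rest) i "")) = true)
      · rw [if_pos hc]
        obtain ⟨hop, hrest⟩ := (pvShift t rest).mp ((pvRanges_iff (t :: rest)).mp hc)
        simp only [hop, Bool.not_true, Bool.false_eq_true, if_false]
        rw [if_pos ⟨hlen, hrest⟩]
      · rw [if_neg hc]
        by_cases hop : pvOperand t = true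
        · simp only [hop, Bool.not_true, Bool.false_eq_true, if_false]
          rw [if_neg (by
            rintro ⟨-, hrest⟩
            exact hc ((pvRanges_iff (t :: rest)).mpr ((pvShift t rest).mpr ⟨hop, hrest⟩)))]
        · rw [Bool.not_eq_true] at hop
          simp [hop]
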